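-- pv_equiv track=rewrite | github.com/PavanKalyan321/ProjectBot | backend/bot.py | print_model_table
-- ===== SOURCE A (Python) =====
-- def print_model_table(rows):
--     """Pretty-print model predictions in aligned columns"""
--     if not rows:
--         return ""
--     headers = list(rows[0].keys())
--     widths = {h: max(len(h), max(len(str(r.get(h, ''))) for r in rows)) for h in headers}
--     out = []
--     out.append(" " + " | ".join(h.ljust(widths[h]) for h in headers))
--     out.append("-" * (len(out[0])))
--     for r in rows:
--         out.append(" " + " | ".join(str(r.get(h, '')).ljust(widths[h]) for h in headers))
--     return "\n".join(out)
-- ===== SOURCE B (Python) =====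
-- def print_model_table(rows):
--     """Pretty-print model predictions in aligned columns"""
--     if not rows:
--         return ""
--     headers = list(rows[0].keys())
--     # build the table column by column: each column is padded as a whole
--     # (header cell on top), then the lines are stitched from the columns
--     cols = []
--     for h in headers:
--         col = [h] + [str(r.get(h, '')) for r in rows]
--         w = max(len(c) for c in col)
--         cols.append([c.ljust(w) for c in col])
--     lines = [" " + " | ".join(col[i] for col in cols) for i in range(len(rows) + 1)]
--     return "\n".join([lines[0], "-" * len(lines[0])] + lines[1:])
-- ===== Notes on version B (the rewrite author's own statement) =====
-- stated objective: alternative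
-- what changed: B builds the table column-by-column: each column (header cell on top) is padded as a whole list, so the width is a single max over the column and no dict of widths exists; the output lines are then stitched by indexing across the padded columns, instead of A's width-dict pass followed by row-by-row per-cell ljust emission.
import Mathlib
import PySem

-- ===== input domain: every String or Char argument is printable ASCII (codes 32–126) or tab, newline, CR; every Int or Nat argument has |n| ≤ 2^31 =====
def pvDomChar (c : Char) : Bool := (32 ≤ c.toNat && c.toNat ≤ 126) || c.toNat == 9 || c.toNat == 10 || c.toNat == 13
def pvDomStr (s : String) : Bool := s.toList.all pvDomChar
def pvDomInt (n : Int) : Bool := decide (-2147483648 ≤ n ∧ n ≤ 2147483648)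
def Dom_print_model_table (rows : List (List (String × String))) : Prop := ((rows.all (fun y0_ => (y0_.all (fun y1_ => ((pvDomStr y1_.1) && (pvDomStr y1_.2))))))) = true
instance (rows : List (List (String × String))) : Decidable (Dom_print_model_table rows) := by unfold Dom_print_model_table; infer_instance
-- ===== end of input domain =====

-- B builds the table column by column — each column (header cell on top) is padded as a
-- whole, so no widths dict exists — and the lines are stitched by indexing the columns.

-- shared ports of the Python builtins both versions call:
-- s.ljust(w) (pad right with spaces, never truncates)
def pyLjust (s : String) (w : Nat) : String :=
  String.ofList (s.toList ++ List.replicate (w - s.toList.length) ' ')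
-- "-" * n
def strRepeat (c : Char) (n : Nat) : String := String.ofList (List.replicate n c)

-- ===== PORT A =====
-- Notes on exactness: rows are Python dicts of str->str, so `str(r.get(h,''))` is the
-- lookup itself (PySem.Dict.ofList gives exactly dict(assoc-list) semantics); the inner
-- `max(...)` generator is over the nonempty `rows`, and `widths[h]` always finds h
-- (every h in headers was inserted), so the `.getD` defaults are never reached.
def print_model_table (rows : List (List (String × String))) : String :=
  match rows with
  | [] => ""
  | r0 :: _ =>
    let headers := (PySem.Dict.ofList r0).keys
    let widths : PySem.Dict String Nat := headers.foldl (fun d h =>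
      d.insert h (max h.toList.length
        ((PySem.List.max? (rows.map (fun r =>
            ((PySem.Dict.ofList r).getD h "").toList.length)) (fun x => x)).getD 0))) PySem.Dict.empty
    let line0 := " " ++ PySem.Str.join " | " (headers.map (fun h => pyLjust h (widths.getD h 0)))
    let out := [line0, strRepeat '-' (PySem.List.pyGetD [line0] 0 "").toList.length]
    let out := out ++ rows.map (fun r =>
      " " ++ PySem.Str.join " | " (headers.map (fun h =>
        pyLjust ((PySem.Dict.ofList r).getD h "") (widths.getD h 0))))
    PySem.Str.join "\n" out

-- ===== PORT B =====
-- column index i is always in range (every column has length rows.length + 1),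
-- so Python's col[i] is PySem.List.pyGetD with an unreachable default
def print_model_table_alt (rows : List (List (String × String))) : String :=
  match rows with
  | [] => ""
  | r0 :: _ =>
    let headers := (PySem.Dict.ofList r0).keys
    let cols := headers.map (fun h =>
      let col := h :: rows.map (fun r => (PySem.Dict.ofList r).getD h "")
      let w := (PySem.List.max? (col.map (fun c => c.toList.length)) (fun x => x)).getD 0
      col.map (fun c => pyLjust c w))
    let lines := (PySem.List.pyRange 0 ((rows.length : Int) + 1) 1).map (fun i =>
      " " ++ PySem.Str.join " | " (cols.map (fun col => PySem.List.pyGetD col i "")))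
    PySem.Str.join "\n"
      ([PySem.List.pyGetD lines 0 "",
        strRepeat '-' (PySem.List.pyGetD lines 0 "").toList.length] ++ lines.tail)

-- ===== PRECONDITION & SPEC =====
def Spec_print_model_table (rows : List (List (String × String))) (out : String) : Prop := out = print_model_table_alt rows
instance (rows : List (List (String × String))) (out : String) : Decidable (Spec_print_model_table rows out) := by unfold Spec_print_model_table; infer_instance

-- ===== CLAIM (what is proved, stated in full; the proofs are below) =====
def Claim_equal_print_model_table : Prop := ∀ (rows : List (List (String × String))), Dom_print_model_table rows → Spec_print_model_table rows (print_model_table rows)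

-- ===== LEMMAS AND PROOFS =====

-- lookup through a fold of inserts whose value depends only on the key
theorem getD_foldl_insert_fun_of_not_mem (f : String → Nat) (h : String)
    (l : List String) (d : PySem.Dict String Nat) (hn : h ∉ l) :
    (l.foldl (fun d k => d.insert k (f k)) d).getD h 0 = d.getD h 0 := by
  induction l generalizing d with
  | nil => rfl
  | cons a t ih =>
    simp only [List.mem_cons, not_or] at hn
    simp only [List.foldl_cons, ih _ hn.2, PySem.Dict.getD_insert, if_neg hn.1]

theorem getD_foldl_insert_fun_of_mem (f : String → Nat) (h : String)
    (l : List String) (d : PySem.Dict String Nat) (hm : h ∈ l) :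
    (l.foldl (fun d k => d.insert k (f k)) d).getD h 0 = f h := by
  induction l generalizing d with
  | nil => cases hm
  | cons a t ih =>
    by_cases ht : h ∈ t
    · simpa using ih _ ht
    · have ha : h = a := (List.mem_cons.mp hm).resolve_right ht
      subst ha
      simp only [List.foldl_cons, getD_foldl_insert_fun_of_not_mem f h t _ ht,
        PySem.Dict.getD_insert_self]

-- running max absorbs an outer max
theorem foldl_max_max (l : List Nat) (a b : Nat) :
    l.foldl max (max a b) = max a (l.foldl max b) := by
  induction l generalizing b with
  | nil => rfl
  | cons c t ih => simp only [List.foldl_cons, max_assoc, ih]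

-- B's column width (max over header::cells) equals A's max(len h, max cells)
theorem width_eq (a : Nat) (l : List Nat) (hl : l ≠ []) :
    ((PySem.List.max? (a :: l) (fun x => x)).getD 0)
      = max a ((PySem.List.max? l (fun x => x)).getD 0) := by
  match l, hl with
  | b :: t, _ =>
    simp only [PySem.List.max?_id_cons, Option.getD_some, List.foldl_cons]
    exact foldl_max_max t a b

-- indexing over List.range of a list's length reproduces a map over the list
theorem range_map_eq {α β : Type} (l : List α) (f : Nat → β) (g : α → β)
    (hf : ∀ (k : Nat) (h : k < l.length), f k = g l[k]) :
    (List.range l.length).map f = l.map g := by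
  apply List.ext_getElem
  · simp
  · intro i h1 h2
    simp only [List.getElem_map, List.getElem_range]
    exact hf i (by simpa using h2)

-- ===== VERDICT (by name: the statement is the Claim_ definition above) =====
theorem print_model_table_spec : Claim_equal_print_model_table := by
  intro rows _
  unfold Spec_print_model_table print_model_table print_model_table_alt
  match rows with
  | [] => rfl
  | r0 :: rest =>
    simp only
    set rows := r0 :: rest with hrows
    set headers := (PySem.Dict.ofList r0).keys with hh
    set g : List (String × String) → String → String :=
      fun r h => (PySem.Dict.ofList r).getD h "" with hg
    set wf : String → Nat := fun h =>
      max h.toList.length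
        ((PySem.List.max? (rows.map (fun r => (g r h).toList.length)) (fun x => x)).getD 0) with hwf
    -- A's widths dict looks up to wf on headers
    have hA : ∀ h ∈ headers,
        (headers.foldl (fun d h => d.insert h (wf h)) PySem.Dict.empty).getD h 0 = wf h :=
      fun h hm => getD_foldl_insert_fun_of_mem wf h headers _ hm
    -- B's padded columns, with the width rewritten to wf
    have hcols : headers.map (fun h =>
        ((h :: rows.map (fun r => g r h)).map (fun c =>
          pyLjust c ((PySem.List.max? ((h :: rows.map (fun r => g r h)).map
            (fun c => c.toList.length)) (fun x => x)).getD 0))))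
        = headers.map (fun h => (h :: rows.map (fun r => g r h)).map (fun c => pyLjust c (wf h))) := by
      apply List.map_congr_left
      intro h _
      have hne : (rows.map (fun r => g r h)).map (fun c => c.toList.length) ≠ [] := by
        simp [hrows]
      simp only [List.map_cons]
      rw [width_eq _ _ hne]
      simp [hwf, List.map_map, Function.comp_def]
    -- B's lines list equals A's header line consed on A's body lines
    have hlines : (PySem.List.pyRange 0 ((rows.length : Int) + 1) 1).map (fun i =>
        " " ++ PySem.Str.join " | " ((headers.map (fun h =>
          (h :: rows.map (fun r => g r h)).map (fun c => pyLjust c (wf h)))).map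
            (fun col => PySem.List.pyGetD col i "")))
        = (" " ++ PySem.Str.join " | " (headers.map (fun h => pyLjust h (wf h))))
          :: rows.map (fun r =>
            " " ++ PySem.Str.join " | " (headers.map (fun h => pyLjust (g r h) (wf h)))) := by
      rw [PySem.List.pyRange_one_cons (by positivity)]
      rw [List.map_cons]
      congr 1
      · refine congrArg (fun l => " " ++ PySem.Str.join " | " l) ?_
        rw [List.map_map]
        apply List.map_congr_left
        intro h _
        simp [PySem.List.pyGetD_zero_cons]
      · have hn : (((rows.length : Int) + 1) - (0 + 1)).toNat = rows.length := by omega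
        have hr : PySem.List.pyRange (0 + 1) ((rows.length : Int) + 1) 1
            = (List.range rows.length).map (fun k : Nat => (0 : Int) + 1 + (k : Int)) := by
          rw [PySem.List.pyRange_one, hn]
        rw [hr, List.map_map]
        apply range_map_eq rows _ _
        intro k hk
        simp only [Function.comp_def]
        congr 1
        refine congrArg (PySem.Str.join " | ") ?_
        rw [List.map_map]
        apply List.map_congr_left
        intro h _
        simp only [Function.comp_def]
        have hcast : (0 : Int) + 1 + (k : Int) = ((k + 1 : Nat) : Int) := by push_cast; ring
        rw [hcast, PySem.List.pyGetD_natCast]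
        simp [List.getElem?_eq_getElem hk]
    rw [hcols, hlines]
    -- rewrite A's dict lookups to wf and close
    have hhead : headers.map (fun h =>
        pyLjust h ((headers.foldl (fun d h => d.insert h (wf h)) PySem.Dict.empty).getD h 0))
        = headers.map (fun h => pyLjust h (wf h)) :=
      List.map_congr_left (fun h hm => by rw [hA h hm])
    have hbody : rows.map (fun r =>
        " " ++ PySem.Str.join " | " (headers.map (fun h =>
          pyLjust (g r h) ((headers.foldl (fun d h => d.insert h (wf h)) PySem.Dict.empty).getD h 0))))
        = rows.map (fun r =>
          " " ++ PySem.Str.join " | " (headers.map (fun h => pyLjust (g r h) (wf h)))) :=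
      List.map_congr_left (fun r _ =>
        congrArg (fun l => " " ++ PySem.Str.join " | " l)
          (List.map_congr_left (fun h hm => by rw [hA h hm])))
    simp only [PySem.List.pyGetD_zero_cons, List.tail_cons]
    rw [hhead, hbody]
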